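-- pv_equiv track=rewrite | github.com/sCrypt-Inc/py-scryptlib | scryptlib/utils.py | subscript
-- ===== SOURCE A (Python) =====
-- import math
--
-- def subscript(idx, array_sizes):
--     if len(array_sizes) == 1:
--         return '[{}]'.format(idx)
--     elif len(array_sizes) > 1:
--         sub_array_sizes = array_sizes[1:]
--         offset = 1
--         for size_str in sub_array_sizes:
--             offset += int(size_str)
--         return '[{}]{}'.format(math.floor(idx / offset), subscript(idx % offset, sub_array_sizes))
-- ===== SOURCE B (Python) =====
-- def subscript(idx, array_sizes):
--     # Iterative version: one reverse pass precomputes every level's offset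
--     # (1 + sum of the remaining sizes), then one forward pass emits the parts.
--     if not array_sizes:
--         return None
--     offsets = []
--     acc = 1
--     for s in reversed(array_sizes):
--         offsets.append(acc)
--         acc += int(s)
--     offsets.reverse()
--     out = ''
--     for off in offsets[:-1]:
--         out += '[{}]'.format(idx // off)
--         idx %= off
--     return out + '[{}]'.format(idx)
-- ===== Notes on version B (the rewrite author's own statement) =====
-- stated objective: faster
-- what changed: Recursion re-summing the tail at every level is replaced by an iterative two-pass loop: one reverse pass precomputes all suffix offsets, one forward pass emits the bracketed indices.
-- outside the precondition, e.g. on subscript(0, [0, -1]): A raises ZeroDivisionError, B raises ZeroDivisionError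
import Mathlib
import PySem

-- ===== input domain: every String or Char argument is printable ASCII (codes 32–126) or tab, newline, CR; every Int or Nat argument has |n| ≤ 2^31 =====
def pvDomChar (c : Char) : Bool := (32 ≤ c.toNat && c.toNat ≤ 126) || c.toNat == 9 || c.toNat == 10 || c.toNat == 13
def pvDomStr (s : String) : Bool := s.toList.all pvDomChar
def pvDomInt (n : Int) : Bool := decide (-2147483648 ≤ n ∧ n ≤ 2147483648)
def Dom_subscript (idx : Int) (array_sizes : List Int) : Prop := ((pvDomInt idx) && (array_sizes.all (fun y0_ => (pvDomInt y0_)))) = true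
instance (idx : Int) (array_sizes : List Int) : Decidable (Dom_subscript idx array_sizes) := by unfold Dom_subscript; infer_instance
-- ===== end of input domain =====

-- B replaces A's recursion (which re-sums the tail at every level, O(n^2)) by an
-- iterative two-pass loop over precomputed suffix offsets (O(n)).


-- ===== PORT A =====
-- math.floor(idx / offset) is ported as floor division PySem.Int.floordiv: exact on Dom
-- (|idx|, |sizes| ≤ 2^31 keeps the float quotient's floor equal to the integer floor);
-- offset = 0 (Python ZeroDivisionError) is excluded by Pre_subscript.
def subscript (idx : Int) (array_sizes : List Int) : Option String :=
  match array_sizes with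
  | [] => none                                           -- falls through both branches: returns None
  | [_] => some ("[" ++ PySem.Int.toStr idx ++ "]")
  | _ :: tail =>                                         -- len(array_sizes) > 1
    let offset := tail.foldl (fun acc s => acc + s) 1    -- offset = 1; for s in tail: offset += int(s)
    some ("[" ++ PySem.Int.toStr (PySem.Int.floordiv idx offset) ++ "]" ++
      (match subscript (PySem.Int.mod idx offset) tail with
       | some s => s
       | none => "None"))                                -- '{}'.format(None) formats as "None" (tail ≠ [], never hit)

-- ===== PORT B =====
-- one forward-loop step of Source B: emit '[idx // off]' and set idx = idx % off
def subStep (st : Int × String) (off : Int) : Int × String :=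
  (PySem.Int.mod st.1 off, st.2 ++ "[" ++ PySem.Int.toStr (PySem.Int.floordiv st.1 off) ++ "]")

-- reverse pass of Source B (loop over reversed list, then reverse the result = foldr):
-- returns (final acc, offsets) with offsets[i] = 1 + sum(array_sizes[i+1:])
def subOffsets (sizes : List Int) : Int × List Int :=
  sizes.foldr (fun s st => (st.1 + s, st.1 :: st.2)) (1, [])

def subscript_alt (idx : Int) (array_sizes : List Int) : Option String :=
  if array_sizes = [] then none
  else
    let offsets := (subOffsets array_sizes).2
    let st := offsets.dropLast.foldl subStep (idx, "")   -- offsets[:-1] = dropLast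
    some (st.2 ++ "[" ++ PySem.Int.toStr st.1 ++ "]")

-- ===== PRECONDITION & SPEC =====
-- Pre_ excludes exactly the inputs where some recursion level's offset 1 + sum(array_sizes[j:])
-- is 0, on which Python A raises ZeroDivisionError (B raises there too).
def Pre_subscript (idx : Int) (array_sizes : List Int) : Prop :=
  ∀ j ∈ List.range array_sizes.length, 0 < j → 1 + (array_sizes.drop j).sum ≠ 0
instance (idx : Int) (array_sizes : List Int) : Decidable (Pre_subscript idx array_sizes) := by
  unfold Pre_subscript; infer_instance
def pvWitness_subscript : Int × List Int := (5, [2, 3])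

def Spec_subscript (idx : Int) (array_sizes : List Int) (out : Option String) : Prop := out = subscript_alt idx array_sizes
instance (idx : Int) (array_sizes : List Int) (out : Option String) : Decidable (Spec_subscript idx array_sizes out) := by unfold Spec_subscript; infer_instance

-- ===== CLAIM (what is proved, stated in full; the proofs are below) =====
def Claim_equal_subscript : Prop := ∀ (idx : Int) (array_sizes : List Int), Dom_subscript idx array_sizes → Pre_subscript idx array_sizes → Spec_subscript idx array_sizes (subscript idx array_sizes)

-- ===== LEMMAS AND PROOFS =====

-- B's nonempty-case result as a plain string
def altStr (idx : Int) (sizes : List Int) : String :=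
  let st := (subOffsets sizes).2.dropLast.foldl subStep (idx, "")
  st.2 ++ "[" ++ PySem.Int.toStr st.1 ++ "]"

theorem foldl_add_one (l : List Int) (c : Int) :
    l.foldl (fun acc s => acc + s) c = c + l.sum := by
  induction l generalizing c with
  | nil => simp
  | cons x xs ih => simp [List.foldl_cons, ih]; ring

theorem subOffsets_fst (l : List Int) : (subOffsets l).1 = 1 + l.sum := by
  induction l with
  | nil => simp [subOffsets]
  | cons x xs ih => simp [subOffsets] at ih ⊢; omega

theorem subOffsets_len (l : List Int) : (subOffsets l).2.length = l.length := by
  induction l with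
  | nil => simp [subOffsets]
  | cons x xs ih => simp [subOffsets] at ih ⊢; omega

theorem foldl_subStep_acc (l : List Int) (i : Int) (p : String) :
    l.foldl subStep (i, p) =
      ((l.foldl subStep (i, "")).1, p ++ (l.foldl subStep (i, "")).2) := by
  induction l generalizing i p with
  | nil => simp
  | cons x xs ih =>
    simp only [List.foldl_cons, subStep]
    rw [ih, ih (PySem.Int.mod i x) ("" ++ "[" ++ PySem.Int.toStr (PySem.Int.floordiv i x) ++ "]")]
    simp [String.append_assoc]

theorem subscript_eq_altStr (sizes : List Int) (h : sizes ≠ []) (idx : Int) :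
    subscript idx sizes = some (altStr idx sizes) := by
  induction sizes generalizing idx with
  | nil => exact absurd rfl h
  | cons s rest ih =>
    cases rest with
    | nil => simp [subscript, altStr, subOffsets]
    | cons t r =>
      have hne : (t :: r) ≠ [] := by simp
      have hoff : (subOffsets (t :: r)).2 ≠ [] := by
        have := subOffsets_len (t :: r); intro hc; rw [hc] at this; simp at this
      have hofffst : (subOffsets (t :: r)).1 = 1 + (t :: r).sum := subOffsets_fst _
      have hfold : (t :: r).foldl (fun acc s => acc + s) 1 = 1 + (t :: r).sum :=
        foldl_add_one _ _
      simp only [subscript, hfold, ih hne]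
      -- unfold B's string on s :: t :: r
      have hcons : (subOffsets (s :: t :: r)).2 =
          (subOffsets (t :: r)).1 :: (subOffsets (t :: r)).2 := by
        simp [subOffsets]
      simp only [altStr, hcons, hofffst, List.dropLast_cons_of_ne_nil hoff,
        List.foldl_cons, subStep]
      rw [foldl_subStep_acc _ (PySem.Int.mod idx (1 + (t :: r).sum))
        ("" ++ "[" ++ PySem.Int.toStr (PySem.Int.floordiv idx (1 + (t :: r).sum)) ++ "]")]
      simp [String.append_assoc]

-- ===== VERDICT (by name: the statement is the Claim_ definition above) =====
theorem subscript_spec : Claim_equal_subscript := by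
  intro idx sizes _ _
  unfold Spec_subscript
  cases sizes with
  | nil => simp [subscript, subscript_alt]
  | cons s rest =>
    rw [subscript_eq_altStr (s :: rest) (by simp) idx]
    simp [subscript_alt, altStr]
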